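-- pv_equiv track=rewrite | github.com/not-chciken/jungle-book-gb-disassembly | utils/asset_extractor.py | ConvertToPixelData
-- ===== SOURCE A (Python) =====
-- def CoordinateToTileOffset(x, y, width, bpp):
--     bytes_per_tile_row = bpp  # 8 pixels at 1 or 2 bits per pixel
--     bytes_per_tile = bytes_per_tile_row * 8  # 8 rows per tile
--     tiles_per_row = width // 8
--     tile_y = y // 8
--     tile_x = x // 8
--     row_of_tile = y & 7
--     return (tile_y * tiles_per_row * bytes_per_tile) + (tile_x * bytes_per_tile) + (row_of_tile * bytes_per_tile_row)
--
-- def ConvertToPixelData(data, width, height, bpp):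
--     result = []
--     for y in range(0, height):
--         row = []
--         for x in range(0, width):
--             offset = CoordinateToTileOffset(x, y, width, bpp)
--
--             if offset < len(data):
--                 # extract the color from the one or two bytes of tile data at the offset
--                 shift = (7 - (x & 7))
--                 mask = (1 << shift)
--                 if bpp == 2:
--                     color = ((data[offset] & mask) >> shift) + (((data[offset + 1] & mask) >> shift) << 1)
--                 else:
--                     color = ((data[offset] & mask) >> shift)
--             else:
--                 color = 0
--
--             row.append(color)
--         result.append(row)
--
--     return result
-- ===== SOURCE B (Python) =====
-- def ConvertToPixelData(data, width, height, bpp):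
--     # Tile-based decoding: one offset computation and one or two byte reads per
--     # run of up-to-8 pixels, instead of A's per-pixel offset/index work.
--     n = len(data)
--     tiles_per_row = width // 8
--     bytes_per_tile = 8 * bpp
--     ntx = (width + 7) // 8  # tile columns covering all x < width
--     result = []
--     for y in range(height):
--         ty = y // 8
--         r = y & 7
--         row = []
--         for tx in range(ntx):
--             off = ty * tiles_per_row * bytes_per_tile + tx * bytes_per_tile + r * bpp
--             w = min(8, width - tx * 8)  # pixels of this tile inside the image
--             if off < n:
--                 b0 = data[off]
--                 if bpp == 2:
--                     b1 = data[off + 1]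
--                     row.extend(((b0 & (1 << (7 - k))) >> (7 - k))
--                                + ((((b1 & (1 << (7 - k))) >> (7 - k))) << 1)
--                                for k in range(w))
--                 else:
--                     row.extend(((b0 & (1 << (7 - k))) >> (7 - k)) for k in range(w))
--             else:
--                 row.extend([0] * w)
--         result.append(row)
--     return result
-- ===== Notes on version B (the rewrite author's own statement) =====
-- stated objective: alternative
-- what changed: B decodes tile-by-tile: it iterates over tile columns, computes the byte offset once per run of up-to-8 pixels and reads the plane byte(s) once per tile scanline, extending the row with the decoded bits, instead of A's recomputing the tile offset and re-indexing data for every single pixel.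
import Mathlib
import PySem

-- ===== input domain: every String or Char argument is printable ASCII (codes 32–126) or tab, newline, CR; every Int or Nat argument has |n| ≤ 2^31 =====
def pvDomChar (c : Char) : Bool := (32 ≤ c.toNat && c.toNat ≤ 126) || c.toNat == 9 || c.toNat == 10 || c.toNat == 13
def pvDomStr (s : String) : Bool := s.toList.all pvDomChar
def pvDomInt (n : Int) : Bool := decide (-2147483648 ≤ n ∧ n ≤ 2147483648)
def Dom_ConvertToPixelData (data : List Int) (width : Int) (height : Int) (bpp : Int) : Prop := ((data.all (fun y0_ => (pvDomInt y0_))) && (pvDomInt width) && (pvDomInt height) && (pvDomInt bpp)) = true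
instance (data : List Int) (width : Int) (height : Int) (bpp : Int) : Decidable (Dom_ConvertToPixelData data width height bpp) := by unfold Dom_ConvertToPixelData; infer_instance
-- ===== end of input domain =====

-- B decodes tile-by-tile (offset and plane-byte reads once per up-to-8-pixel tile scanline,
-- row extended by the decoded bits) instead of A's per-pixel offset/index work; equivalence
-- on all inputs where the Python A returns (Pre_ excludes exactly its IndexErrors).


-- ===== PORT A =====
def CoordinateToTileOffset (x : Int) (y : Int) (width : Int) (bpp : Int) : Int :=
  let bytesPerTileRow := bpp
  let bytesPerTile := bytesPerTileRow * 8
  let tilesPerRow := PySem.Int.floordiv width 8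
  let tileY := PySem.Int.floordiv y 8
  let tileX := PySem.Int.floordiv x 8
  let rowOfTile := PySem.Int.band y 7
  tileY * tilesPerRow * bytesPerTile + tileX * bytesPerTile + rowOfTile * bytesPerTileRow

-- data[i] is ported as pyGetD data i 0; Pre_ guarantees every executed access is in range.
-- 1 << shift is ported as 1 <<< shift.toNat: shift = 7 - (x & 7) is always in [0, 7].
def ConvertToPixelData (data : List Int) (width : Int) (height : Int) (bpp : Int) : List (List Int) :=
  (PySem.List.pyRange 0 height 1).foldl (fun result y =>
    result ++ [(PySem.List.pyRange 0 width 1).foldl (fun row x =>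
      let offset := CoordinateToTileOffset x y width bpp
      let color :=
        if offset < (data.length : Int) then
          let shift := 7 - PySem.Int.band x 7
          let mask := (1 : Int) <<< shift.toNat
          if bpp = 2 then
            (PySem.Int.band (PySem.List.pyGetD data offset 0) mask >>> shift.toNat) +
            ((PySem.Int.band (PySem.List.pyGetD data (offset + 1) 0) mask >>> shift.toNat) <<< 1)
          else
            PySem.Int.band (PySem.List.pyGetD data offset 0) mask >>> shift.toNat
        else 0
      row ++ [color]) []]) []

-- ===== PORT B =====
def ConvertToPixelData_alt (data : List Int) (width : Int) (height : Int) (bpp : Int) : List (List Int) :=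
  let n : Int := data.length
  let tilesPerRow := PySem.Int.floordiv width 8
  let bytesPerTile := 8 * bpp
  let ntx := PySem.Int.floordiv (width + 7) 8
  (PySem.List.pyRange 0 height 1).foldl (fun result y =>
    let ty := PySem.Int.floordiv y 8
    let r := PySem.Int.band y 7
    let row := (PySem.List.pyRange 0 ntx 1).foldl (fun row tx =>
      row ++
        (let off := ty * tilesPerRow * bytesPerTile + tx * bytesPerTile + r * bpp
         let w := min 8 (width - tx * 8)
         if off < n then
           let b0 := PySem.List.pyGetD data off 0
           if bpp = 2 then
             let b1 := PySem.List.pyGetD data (off + 1) 0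
             (PySem.List.pyRange 0 w 1).map (fun k =>
               let shift : Int := 7 - k
               let mask := (1 : Int) <<< shift.toNat
               (PySem.Int.band b0 mask >>> shift.toNat) +
               ((PySem.Int.band b1 mask >>> shift.toNat) <<< 1))
           else
             (PySem.List.pyRange 0 w 1).map (fun k =>
               let shift : Int := 7 - k
               let mask := (1 : Int) <<< shift.toNat
               PySem.Int.band b0 mask >>> shift.toNat)
         else List.replicate w.toNat 0)) []
    result ++ [row]) []

-- ===== PRECONDITION & SPEC =====
-- Pre_ excludes exactly the inputs where the Python A raises IndexError; in closed form:
-- with any pixels at all (width, height >= 1), for bpp = 2 this happens iff len(data) is odd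
-- and the half-offset (len-1)/2 is realised by some visited tile scanline (the bounded
-- exists below), and for bpp < 0 iff the most negative visited offset -bpp*smax goes below
-- -len(data); other bpp never raise.
def Pre_ConvertToPixelData (data : List Int) (width : Int) (height : Int) (bpp : Int) : Prop :=
  width ≤ 0 ∨ height ≤ 0 ∨
  ((bpp = 2 → ¬ ((data.length : Int) % 2 = 1 ∧
      ∃ ty ∈ PySem.List.pyRange 0
          (min ((height + 7) / 8) (((data.length : Int) - 1) / 2 + 1)) 1,
        0 ≤ ((data.length : Int) - 1) / 2 - 8 * (width / 8) * ty ∧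
        (((data.length : Int) - 1) / 2 - 8 * (width / 8) * ty) / 8 < (width + 7) / 8 ∧
        (((data.length : Int) - 1) / 2 - 8 * (width / 8) * ty) % 8 < min 8 (height - 8 * ty)))
   ∧ (bpp < 0 →
      -bpp * (if width / 8 = 0 then 8 * ((width + 7) / 8 - 1) + min 8 height - 1
              else 8 * (width / 8) * ((height + 7) / 8 - 1) + 8 * ((width + 7) / 8 - 1)
                   + (height - 8 * ((height + 7) / 8 - 1) - 1)) ≤ (data.length : Int)))
instance (data : List Int) (width : Int) (height : Int) (bpp : Int) : Decidable (Pre_ConvertToPixelData data width height bpp) := by unfold Pre_ConvertToPixelData; infer_instance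

def pvWitness_ConvertToPixelData : List Int × Int × Int × Int := ([3, 129, 64, 66], 8, 2, 2)

def Spec_ConvertToPixelData (data : List Int) (width : Int) (height : Int) (bpp : Int) (out : List (List Int)) : Prop := out = ConvertToPixelData_alt data width height bpp
instance (data : List Int) (width : Int) (height : Int) (bpp : Int) (out : List (List Int)) : Decidable (Spec_ConvertToPixelData data width height bpp out) := by unfold Spec_ConvertToPixelData; infer_instance

-- ===== CLAIM (what is proved, stated in full; the proofs are below) =====
def Claim_equal_ConvertToPixelData : Prop := ∀ (data : List Int) (width : Int) (height : Int) (bpp : Int), Dom_ConvertToPixelData data width height bpp → Pre_ConvertToPixelData data width height bpp → Spec_ConvertToPixelData data width height bpp (ConvertToPixelData data width height bpp)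

-- ===== LEMMAS AND PROOFS =====

-- A's per-pixel value.
def pvPix (data : List Int) (width bpp : Int) (y x : Int) : Int :=
  let offset := CoordinateToTileOffset x y width bpp
  if offset < (data.length : Int) then
    let shift := 7 - PySem.Int.band x 7
    let mask := (1 : Int) <<< shift.toNat
    if bpp = 2 then
      (PySem.Int.band (PySem.List.pyGetD data offset 0) mask >>> shift.toNat) +
      ((PySem.Int.band (PySem.List.pyGetD data (offset + 1) 0) mask >>> shift.toNat) <<< 1)
    else
      PySem.Int.band (PySem.List.pyGetD data offset 0) mask >>> shift.toNat
  else 0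

-- B's per-tile block of pixels.
def pvBlock (data : List Int) (width bpp : Int) (y tx : Int) : List Int :=
  let off := PySem.Int.floordiv y 8 * PySem.Int.floordiv width 8 * (8 * bpp)
    + tx * (8 * bpp) + PySem.Int.band y 7 * bpp
  let w := min 8 (width - tx * 8)
  if off < (data.length : Int) then
    let b0 := PySem.List.pyGetD data off 0
    if bpp = 2 then
      let b1 := PySem.List.pyGetD data (off + 1) 0
      (PySem.List.pyRange 0 w 1).map (fun k =>
        let shift : Int := 7 - k
        let mask := (1 : Int) <<< shift.toNat
        (PySem.Int.band b0 mask >>> shift.toNat) +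
        ((PySem.Int.band b1 mask >>> shift.toNat) <<< 1))
    else
      (PySem.List.pyRange 0 w 1).map (fun k =>
        let shift : Int := 7 - k
        let mask := (1 : Int) <<< shift.toNat
        PySem.Int.band b0 mask >>> shift.toNat)
  else List.replicate w.toNat 0

theorem pvA_char (data : List Int) (width height bpp : Int) :
    ConvertToPixelData data width height bpp =
      (PySem.List.pyRange 0 height 1).map (fun y =>
        (PySem.List.pyRange 0 width 1).map (fun x => pvPix data width bpp y x)) := by
  unfold ConvertToPixelData
  simp only [PySem.List.foldl_append_singleton_eq_map, List.nil_append]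
  rfl

theorem pvFlatMap_singleton {α β : Type} (l : List α) (f : α → List β) :
    (l.flatMap fun x => [f x]) = l.map f := by
  induction l with
  | nil => rfl
  | cons a l ih => simp [ih]

theorem pvB_char (data : List Int) (width height bpp : Int) :
    ConvertToPixelData_alt data width height bpp =
      (PySem.List.pyRange 0 height 1).map (fun y =>
        (PySem.List.pyRange 0 (PySem.Int.floordiv (width + 7) 8) 1).flatMap
          (fun tx => pvBlock data width bpp y tx)) := by
  unfold ConvertToPixelData_alt
  simp only [PySem.List.foldl_append_eq_flatMap, List.nil_append]
  rw [pvFlatMap_singleton]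
  rfl

theorem pvFloordiv8 (t k : Int) (h0 : 0 ≤ k) (h8 : k < 8) :
    PySem.Int.floordiv (8 * t + k) 8 = t := by
  rw [PySem.Int.floordiv_eq_iff_of_pos (by norm_num)]
  omega

theorem pvBand7 (t k : Int) (ht : 0 ≤ t) (h0 : 0 ≤ k) (h8 : k < 8) :
    PySem.Int.band (8 * t + k) 7 = k := by
  rw [PySem.Int.band_of_nonneg (by omega) (by norm_num)]
  have h1 : (8 * t + k).toNat = 8 * t.toNat + k.toNat := by omega
  have h2 : (7 : Int).toNat = 7 := rfl
  rw [h1, h2]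
  have h3 : 8 * t.toNat + k.toNat &&& 7 = k.toNat := by
    have := Nat.and_two_pow_sub_one_eq_mod (8 * t.toNat + k.toNat) 3
    norm_num at this
    omega
  rw [h3]; omega

theorem pvBlock_eq (data : List Int) (width bpp y : Int) (t : Int)
    (ht : 0 ≤ t) (hlt : 8 * t < width) :
    pvBlock data width bpp y t =
      (PySem.List.pyRange (8 * t) (min width (8 * t + 8)) 1).map
        (fun x => pvPix data width bpp y x) := by
  have hw : (min width (8 * t + 8) - 8 * t).toNat = (min 8 (width - t * 8) - 0).toNat := by omega
  simp only [pvBlock, PySem.List.pyRange_one, List.map_map, hw]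
  split_ifs with hN hbpp
  · apply List.map_congr_left
    intro k hk
    simp only [List.mem_range] at hk
    have hk8 : (k : Int) < 8 := by omega
    have hoff : CoordinateToTileOffset (8 * t + (k : Int)) y width bpp =
        PySem.Int.floordiv y 8 * PySem.Int.floordiv width 8 * (8 * bpp) + t * (8 * bpp) +
          PySem.Int.band y 7 * bpp := by
      simp only [CoordinateToTileOffset, pvFloordiv8 t (k : Int) (by positivity) hk8]
      ring
    simp only [Function.comp, pvPix, zero_add, hoff,
      pvBand7 t (k : Int) ht (by positivity) hk8, if_pos hN, if_pos hbpp]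
  · apply List.map_congr_left
    intro k hk
    simp only [List.mem_range] at hk
    have hk8 : (k : Int) < 8 := by omega
    have hoff : CoordinateToTileOffset (8 * t + (k : Int)) y width bpp =
        PySem.Int.floordiv y 8 * PySem.Int.floordiv width 8 * (8 * bpp) + t * (8 * bpp) +
          PySem.Int.band y 7 * bpp := by
      simp only [CoordinateToTileOffset, pvFloordiv8 t (k : Int) (by positivity) hk8]
      ring
    simp only [Function.comp, pvPix, zero_add, hoff,
      pvBand7 t (k : Int) ht (by positivity) hk8, if_pos hN, if_neg hbpp]
  · symm
    rw [List.eq_replicate_iff]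
    refine ⟨by simp, ?_⟩
    intro b hb
    rcases List.mem_map.mp hb with ⟨k, hk, hbk⟩
    simp only [List.mem_range] at hk
    have hk8 : (k : Int) < 8 := by omega
    have hoff : CoordinateToTileOffset (8 * t + (k : Int)) y width bpp =
        PySem.Int.floordiv y 8 * PySem.Int.floordiv width 8 * (8 * bpp) + t * (8 * bpp) +
          PySem.Int.band y 7 * bpp := by
      simp only [CoordinateToTileOffset, pvFloordiv8 t (k : Int) (by positivity) hk8]
      ring
    simp only [Function.comp, pvPix, hoff, if_neg hN] at hbk
    exact hbk.symm

theorem pvRow_eq (data : List Int) (width bpp y : Int) :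
    (PySem.List.pyRange 0 (PySem.Int.floordiv (width + 7) 8) 1).flatMap
        (fun tx => pvBlock data width bpp y tx) =
      (PySem.List.pyRange 0 width 1).map (fun x => pvPix data width bpp y x) := by
  have hT := (PySem.Int.floordiv_eq_iff_of_pos (a := width + 7) (b := 8)
    (q := PySem.Int.floordiv (width + 7) 8) (by norm_num)).mp rfl
  rcases le_or_gt width 0 with hW | hW
  · rw [PySem.List.pyRange_one_eq_nil (by omega), PySem.List.pyRange_one_eq_nil hW]
    simp
  · have key : ∀ m : Nat, (m : Int) ≤ PySem.Int.floordiv (width + 7) 8 →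
        (PySem.List.pyRange 0 (m : Int) 1).flatMap (fun tx => pvBlock data width bpp y tx) =
          (PySem.List.pyRange 0 (min width (8 * (m : Int))) 1).map
            (fun x => pvPix data width bpp y x) := by
      intro m
      induction m with
      | zero =>
        intro _
        rw [PySem.List.pyRange_one_eq_nil (by omega), PySem.List.pyRange_one_eq_nil (by omega)]
        rfl
      | succ m ih =>
        intro hm1
        have hm1' : ((m : Int) + 1) ≤ PySem.Int.floordiv (width + 7) 8 := by push_cast at hm1; omega
        have h8m : 8 * (m : Int) < width := by omega
        have hcast : ((m + 1 : Nat) : Int) = (m : Int) + 1 := by push_cast; ring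
        rw [hcast, PySem.List.pyRange_one_succ_right (by positivity), List.flatMap_append,
          ih (by omega)]
        have hmin : min width (8 * (m : Int)) = 8 * (m : Int) := by omega
        rw [hmin]
        simp only [List.flatMap_cons, List.flatMap_nil, List.append_nil]
        rw [pvBlock_eq data width bpp y (m : Int) (by positivity) h8m]
        rw [← List.map_append,
          ← PySem.List.pyRange_one_append 0 (8 * (m : Int)) (min width (8 * (m : Int) + 8))
            (by positivity) (by omega)]
        have : min width (8 * ((m : Int) + 1)) = min width (8 * (m : Int) + 8) := by ring_nf
        rw [this]
    have hfin := key (PySem.Int.floordiv (width + 7) 8).toNat (by omega)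
    rw [show (((PySem.Int.floordiv (width + 7) 8).toNat : Int)) = PySem.Int.floordiv (width + 7) 8
      by omega] at hfin
    rw [hfin, show min width (8 * PySem.Int.floordiv (width + 7) 8) = width by omega]

-- ===== VERDICT (by name: the statement is the Claim_ definition above) =====
theorem ConvertToPixelData_spec : Claim_equal_ConvertToPixelData := by
  intro data width height bpp _hdom _hpre
  unfold Spec_ConvertToPixelData
  rw [pvA_char, pvB_char]
  exact List.map_congr_left (fun y _ => (pvRow_eq data width bpp y).symm)
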